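-- pv_equiv track=rewrite | github.com/vneves85/nif-validator | nif_validator.py | valida_nif
-- ===== SOURCE A (Python) =====
-- def valida_nif(numero):
--     """ Validação do número de identificação fiscal
--     >>> valida_nif('999999990')
--     True
--     >>> valida_nif('999999999')
--     False
--     >>> valida_nif('501442600')
--     True
--     """
--     EXPECTED_DIGITS = 9
--     if not numero.isdigit() or len(numero) != EXPECTED_DIGITS:
--         return False
--     soma = sum([int(dig) * (EXPECTED_DIGITS - pos) for pos, dig in enumerate(numero)])
--     resto = soma % 11
--     if (numero[-1] == '0' and resto == 1):
--         resto = (soma + 10) % 11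
--     return resto == 0
-- ===== SOURCE B (Python) =====
-- def valida_nif(numero):
--     """Validate Portuguese NIF via derived check digit (idiomatic decomposition)."""
--     if not numero.isdigit() or len(numero) != 9:
--         return False
--     total = sum(int(d) * w for d, w in zip(numero[:8], range(9, 1, -1)))
--     control = 11 - total % 11
--     if control >= 10:
--         control = 0
--     return control == int(numero[-1])
-- ===== Notes on version B (the rewrite author's own statement) =====
-- stated objective: idiomatic
-- what changed: B computes the weighted sum of only the first 8 digits and derives the expected check digit (control = 11 - total % 11, collapsed to zero when it is 10 or 11), comparing it to the last digit, instead of A's full 9-digit sum mod 11 with a special-cased re-sum for the corner where the last digit is zero and the remainder is 1.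
import Mathlib
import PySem

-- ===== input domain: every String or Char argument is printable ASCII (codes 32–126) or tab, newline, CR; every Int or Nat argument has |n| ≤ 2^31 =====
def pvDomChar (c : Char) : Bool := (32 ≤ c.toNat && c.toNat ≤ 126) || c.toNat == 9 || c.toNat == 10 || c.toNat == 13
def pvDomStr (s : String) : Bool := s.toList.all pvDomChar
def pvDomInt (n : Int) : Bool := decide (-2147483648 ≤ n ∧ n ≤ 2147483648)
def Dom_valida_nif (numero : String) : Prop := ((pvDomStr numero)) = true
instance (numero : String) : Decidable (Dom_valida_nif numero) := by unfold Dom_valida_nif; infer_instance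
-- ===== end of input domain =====

-- B validates the NIF by deriving the expected check digit from the first 8 digits (idiomatic decomposition); same results as A.


-- ===== PORT A =====
-- int(dig) for a one-character string; the guard ensures dig is a digit, so Python never raises here
def pvDigit (c : Char) : Int := (PySem.Int.ofChars? [c]).getD 0

def valida_nif (numero : String) : Bool :=
  if ¬ PySem.Str.strIsdigit numero = true ∨ PySem.Str.len numero ≠ 9 then false
  else
    let soma : Int :=
      ((PySem.List.enumerate numero.toList).map (fun pd => pvDigit pd.2 * (9 - pd.1))).sum
    let resto := PySem.Int.mod soma 11
    let resto :=
      if PySem.Str.pyGet? numero (-1) = some '0' ∧ resto = 1 then PySem.Int.mod (soma + 10) 11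
      else resto
    decide (resto = 0)

-- ===== PORT B =====
def valida_nif_alt (numero : String) : Bool :=
  if ¬ PySem.Str.strIsdigit numero = true ∨ PySem.Str.len numero ≠ 9 then false
  else
    let total : Int :=
      (((PySem.List.slice numero.toList none (some 8)).zip (PySem.List.pyRange 9 1 (-1))).map
        (fun dw => pvDigit dw.1 * dw.2)).sum
    let control := 11 - PySem.Int.mod total 11
    let control := if 10 ≤ control then 0 else control
    match PySem.Str.pyGet? numero (-1) with
    | some c => decide (control = pvDigit c)
    | none => false

-- ===== PRECONDITION & SPEC =====
def Spec_valida_nif (numero : String) (out : Bool) : Prop := out = valida_nif_alt numero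
instance (numero : String) (out : Bool) : Decidable (Spec_valida_nif numero out) := by unfold Spec_valida_nif; infer_instance

-- ===== CLAIM (what is proved, stated in full; the proofs are below) =====
def Claim_equal_valida_nif : Prop := ∀ (numero : String), Dom_valida_nif numero → Spec_valida_nif numero (valida_nif numero)

-- ===== LEMMAS AND PROOFS =====

theorem pv_digit_cases (c : Char) (hd : PySem.Chars.isdigit c = true) :
    c = '0' ∨ c = '1' ∨ c = '2' ∨ c = '3' ∨ c = '4' ∨ c = '5' ∨ c = '6' ∨ c = '7' ∨ c = '8' ∨ c = '9' := by
  simp only [PySem.Chars.isdigit, Bool.and_eq_true, decide_eq_true_eq] at hd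
  obtain ⟨hb1, hb2⟩ := hd
  have hn1 : 48 ≤ c.toNat := hb1
  have hn2 : c.toNat ≤ 57 := hb2
  have h2 := Char.ofNat_toNat c
  interval_cases hh : c.toNat <;> simp [← h2]

theorem pv_digit_val (c : Char) (hd : PySem.Chars.isdigit c = true) :
    pvDigit c = (c.toNat : Int) - 48 := by
  rcases pv_digit_cases c hd with h|h|h|h|h|h|h|h|h|h <;> subst h <;> decide

theorem pv_digit_bounds (c : Char) (hd : PySem.Chars.isdigit c = true) :
    48 ≤ c.toNat ∧ c.toNat ≤ 57 := by
  rcases pv_digit_cases c hd with h|h|h|h|h|h|h|h|h|h <;> subst h <;> decide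

theorem pv_eq_zero_char (c : Char) (h : c.toNat = 48) : c = '0' := by
  have h2 := Char.ofNat_toNat c; rw [h] at h2; rw [← h2]

-- ===== VERDICT (by name: the statement is the Claim_ definition above) =====
theorem valida_nif_spec : Claim_equal_valida_nif := by
  intro numero _
  unfold Spec_valida_nif valida_nif valida_nif_alt
  by_cases hg : ¬ PySem.Str.strIsdigit numero = true ∨ PySem.Str.len numero ≠ 9
  · rw [if_pos hg, if_pos hg]
  · rw [if_neg hg, if_neg hg]
    rw [not_or, not_not, not_ne_iff] at hg
    obtain ⟨hdig, hlen⟩ := hg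
    rw [PySem.Str.len_eq] at hlen
    have hlen9 : numero.toList.length = 9 := by exact_mod_cast hlen
    obtain ⟨c0,c1,c2,c3,c4,c5,c6,c7,c8,hl⟩ :
        ∃ a b c d e f g h i, numero.toList = [a,b,c,d,e,f,g,h,i] := by
      rcases hL : numero.toList with _|⟨a,_|⟨b,_|⟨c,_|⟨d,_|⟨e,_|⟨f,_|⟨g,_|⟨h,_|⟨i,_|⟨j,t⟩⟩⟩⟩⟩⟩⟩⟩⟩⟩ <;>
        rw [hL] at hlen9 <;> simp_all
    rw [PySem.Str.strIsdigit_eq, hl] at hdig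
    simp only [PySem.Chars.strIsdigit, List.all_cons, List.all_nil, List.isEmpty_cons,
      Bool.not_false, Bool.true_and, Bool.and_true, Bool.and_eq_true] at hdig
    obtain ⟨h0, h1, h2, h3, h4, h5, h6, h7, h8⟩ := hdig
    have hz : c8 = '0' ↔ c8.toNat = 48 := ⟨fun h => by rw [h]; rfl, pv_eq_zero_char c8⟩
    have hb0 := pv_digit_bounds c0 h0
    have hb1 := pv_digit_bounds c1 h1
    have hb2 := pv_digit_bounds c2 h2
    have hb3 := pv_digit_bounds c3 h3
    have hb4 := pv_digit_bounds c4 h4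
    have hb5 := pv_digit_bounds c5 h5
    have hb6 := pv_digit_bounds c6 h6
    have hb7 := pv_digit_bounds c7 h7
    have hb8 := pv_digit_bounds c8 h8
    have hs : PySem.List.slice [c0, c1, c2, c3, c4, c5, c6, c7, c8] none (some 8)
        = [c0, c1, c2, c3, c4, c5, c6, c7] := rfl
    have hr : PySem.List.pyRange 9 1 (-1) = [9, 8, 7, 6, 5, 4, 3, 2] := by decide
    have hg8 : PySem.List.pyGet? [c0, c1, c2, c3, c4, c5, c6, c7, c8] (-1) = some c8 := rfl
    rw [PySem.Str.pyGet?_eq, PySem.Chars.pyGet?_eq_listPyGet?, hl, hg8, hs, hr]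
    simp only [PySem.List.enumerate_cons, PySem.List.enumerate_nil, List.map_cons, List.map_nil,
      List.sum_cons, List.sum_nil, pv_digit_val _ h0, pv_digit_val _ h1, pv_digit_val _ h2,
      pv_digit_val _ h3, pv_digit_val _ h4, pv_digit_val _ h5, pv_digit_val _ h6,
      pv_digit_val _ h7, pv_digit_val _ h8, List.zip_cons_cons, List.zip_nil_right, Option.some.injEq]
    simp only [show ∀ a : Int, PySem.Int.mod a 11 = a % 11 from
      fun a => PySem.Int.mod_eq_emod_of_pos (by norm_num)]
    simp only [show ((c0.toNat : Int) - 48) * (9 - 0) + (((c1.toNat : Int) - 48) * (9 - (0 + 1)) + (((c2.toNat : Int) - 48) * (9 - (0 + 1 + 1)) + (((c3.toNat : Int) - 48) * (9 - (0 + 1 + 1 + 1)) + (((c4.toNat : Int) - 48) * (9 - (0 + 1 + 1 + 1 + 1)) + (((c5.toNat : Int) - 48) * (9 - (0 + 1 + 1 + 1 + 1 + 1)) + (((c6.toNat : Int) - 48) * (9 - (0 + 1 + 1 + 1 + 1 + 1 + 1)) + (((c7.toNat : Int) - 48) * (9 - (0 + 1 + 1 + 1 + 1 + 1 + 1 + 1))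 + (((c8.toNat : Int) - 48) * (9 - (0 + 1 + 1 + 1 + 1 + 1 + 1 + 1 + 1)) + 0)))))))) = ((c0.toNat : Int) - 48) * 9 + (((c1.toNat : Int) - 48) * 8 + (((c2.toNat : Int) - 48) * 7 + (((c3.toNat : Int) - 48) * 6 + (((c4.toNat : Int) - 48) * 5 + (((c5.toNat : Int) - 48) * 4 + (((c6.toNat : Int) - 48) * 3 + (((c7.toNat : Int) - 48) * 2 + 0))))))) + ((c8.toNat : Int) - 48) from by ring]
    generalize (((c0.toNat : Int) - 48) * 9 + (((c1.toNat : Int) - 48) * 8 + (((c2.toNat : Int) - 48) * 7 + (((c3.toNat : Int) - 48) * 6 + (((c4.toNat : Int) - 48) * 5 + (((c5.toNat : Int) - 48) * 4 + (((c6.toNat : Int) - 48) * 3 + (((c7.toNat : Int) - 48) * 2 + 0))))))) : Int) = t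
    rw [decide_eq_decide]
    simp only [hz]
    split_ifs <;> omega
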